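-- pv_equiv track=rewrite | github.com/ToughmanL/DysASR | evaluation/utils/evaluate.py | get_level_text
-- ===== SOURCE A (Python) =====
-- def get_level_text(person_list, text_dict):
--     person_length = len(person_list[0].split("_"))
--     level_text_dict = {}
--     for ID, text in text_dict.items():
--         person_name = "_".join(ID.split("_")[0:person_length])
--         if person_name in person_list:
--             level_text_dict[ID] = text
--     return level_text_dict
-- ===== SOURCE B (Python) =====
-- def get_level_text(person_list, text_dict):
--     k = person_list[0].count("_") + 1
--     persons = set(person_list)
--     level_text_dict = {}
--     for ID, text in text_dict.items():
--         out = []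
--         n = k
--         for ch in ID:
--             if ch == "_":
--                 if n == 1:
--                     break
--                 n -= 1
--             out.append(ch)
--         if "".join(out) in persons:
--             level_text_dict[ID] = text
--     return level_text_dict
-- ===== Notes on version B (the rewrite author's own statement) =====
-- stated objective: faster
-- what changed: B replaces A's per-ID split('_')/slice/join plus a linear scan of person_list by a single character scan that cuts each ID at the k-th underscore (k taken once from person_list[0].count('_')) and an O(1) lookup in a set built once from person_list.
import Mathlib
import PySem

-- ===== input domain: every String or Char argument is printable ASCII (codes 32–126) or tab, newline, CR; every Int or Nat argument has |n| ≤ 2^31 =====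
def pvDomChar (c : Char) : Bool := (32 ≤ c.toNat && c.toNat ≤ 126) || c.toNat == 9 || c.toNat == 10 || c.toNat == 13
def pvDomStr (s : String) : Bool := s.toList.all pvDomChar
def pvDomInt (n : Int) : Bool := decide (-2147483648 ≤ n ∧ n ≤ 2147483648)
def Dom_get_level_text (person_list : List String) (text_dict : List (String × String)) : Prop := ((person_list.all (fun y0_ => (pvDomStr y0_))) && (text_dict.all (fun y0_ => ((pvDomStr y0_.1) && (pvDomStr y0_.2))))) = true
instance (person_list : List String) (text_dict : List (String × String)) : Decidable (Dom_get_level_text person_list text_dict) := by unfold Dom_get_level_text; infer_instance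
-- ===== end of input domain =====

-- B replaces A's per-ID split/join + list membership by a single character scan that cuts the ID
-- at the k-th underscore and a set lookup (alternative decomposition, same results and order).

-- ===== PORT A =====
-- 'ID.split("_")' always succeeds (separator nonempty), so '.getD []' below is exact, never a default.
def get_level_text (person_list : List String) (text_dict : List (String × String)) : List (String × String) :=
  match PySem.List.pyGet? person_list 0 with
  | none => []   -- person_list[0] raises IndexError; excluded by Pre_
  | some p0 =>
    let person_length : Int := PySem.List.len ((PySem.Str.split? p0 "_").getD [])
    (text_dict.foldl (fun d p =>
        let person_name := PySem.Str.join "_"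
          (PySem.List.slice ((PySem.Str.split? p.1 "_").getD []) (some 0) (some person_length))
        if person_list.contains person_name then d.insert p.1 p.2 else d)
      (PySem.Dict.mk [])).items

-- ===== PORT B =====
-- the char loop of Source B: copy chars, at the k-th '_' stop (break) without copying it
def pyPrefixUpto : List Char → Nat → List Char
  | [], _ => []
  | c :: t, n =>
    if c = '_' then
      (if n = 1 then [] else c :: pyPrefixUpto t (n - 1))
    else c :: pyPrefixUpto t n

def get_level_text_alt (person_list : List String) (text_dict : List (String × String)) : List (String × String) :=
  match PySem.List.pyGet? person_list 0 with
  | none => []   -- person_list[0].count(...) raises IndexError in Source B too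
  | some p0 =>
    let k : Nat := PySem.Str.count p0 "_" + 1
    let persons : PySem.Set String := PySem.Set.ofList person_list
    (text_dict.foldl (fun d p =>
        if PySem.Set.contains persons (String.ofList (pyPrefixUpto p.1.toList k)) then
          d.insert p.1 p.2
        else d)
      (PySem.Dict.mk [])).items

-- ===== PRECONDITION & SPEC =====
-- A evaluates person_list[0]: it raises IndexError on an empty person_list (and so does B).
def Pre_get_level_text (person_list : List String) (text_dict : List (String × String)) : Prop :=
  person_list ≠ []
instance (person_list : List String) (text_dict : List (String × String)) : Decidable (Pre_get_level_text person_list text_dict) := by unfold Pre_get_level_text; infer_instance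

def pvWitness_get_level_text : List String × (List (String × String)) :=
  (["F_01", "N_02"], [("F_01_task1", "hello"), ("M_03_task2", "bye")])

def Spec_get_level_text (person_list : List String) (text_dict : List (String × String)) (out : List (String × String)) : Prop := out = get_level_text_alt person_list text_dict
instance (person_list : List String) (text_dict : List (String × String)) (out : List (String × String)) : Decidable (Spec_get_level_text person_list text_dict out) := by unfold Spec_get_level_text; infer_instance

-- ===== CLAIM (what is proved, stated in full; the proofs are below) =====
def Claim_equal_get_level_text : Prop := ∀ (person_list : List String) (text_dict : List (String × String)), Dom_get_level_text person_list text_dict → Pre_get_level_text person_list text_dict → Spec_get_level_text person_list text_dict (get_level_text person_list text_dict)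

-- ===== LEMMAS AND PROOFS =====

-- structural version of s.split("_"): sp cs = cs split at every '_'
def sp : List Char → List (List Char)
  | [] => [[]]
  | c :: t =>
    match sp t with
    | [] => [[c]]          -- unreachable: sp is never []
    | h :: r => if c = '_' then [] :: h :: r else (c :: h) :: r

def headmerge (pre : List Char) : List (List Char) → List (List Char)
  | [] => [pre]
  | h :: r => (pre ++ h) :: r

theorem sp_ne_nil : ∀ cs, sp cs ≠ []
  | [] => by simp [sp]
  | c :: t => by
    simp only [sp]
    cases hsp : sp t with
    | nil => simp
    | cons h r => by_cases hc : c = '_' <;> simp [hc]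

theorem splitOn_go_spec (fuel : Nat) : ∀ (l cur : List Char) (accs : List (List Char)),
    l.length < fuel →
    PySem.Chars.splitOn.go ['_'] fuel l (cur) (accs) = accs.reverse ++ headmerge cur.reverse (sp l) := by
  induction fuel with
  | zero => intro l cur accs h; omega
  | succ fuel ih =>
    intro l cur accs h
    cases l with
    | nil =>
      simp [PySem.Chars.splitOn.go, sp, headmerge]
    | cons c rest =>
      simp only [PySem.Chars.splitOn.go]
      by_cases hc : c = '_'
      · subst hc
        have hp : List.isPrefixOf ['_'] ('_' :: rest) = true := by simp [List.isPrefixOf]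
        rw [if_pos hp]
        simp only [List.length_cons] at h
        simp only [List.length_cons, List.length_nil, List.drop_succ_cons, List.drop_zero]
        rw [ih rest [] (cur.reverse :: accs) (by omega)]
        cases hsp : sp rest with
        | nil => exact absurd hsp (sp_ne_nil rest)
        | cons h' r' => simp [sp, hsp, headmerge]
      · have hp : List.isPrefixOf ['_'] (c :: rest) = false := by
          simp [List.isPrefixOf]; exact fun hh => absurd hh.symm hc
        rw [if_neg (by simp only [hp, Bool.false_eq_true, not_false_iff])]
        simp only [List.length_cons] at h
        rw [ih rest (c :: cur) accs (by omega)]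
        simp only [sp]
        cases hsp : sp rest with
        | nil => exact absurd hsp (sp_ne_nil rest)
        | cons h' r' => simp [headmerge, hc]

theorem splitOn_eq_sp (cs : List Char) : PySem.Chars.splitOn cs ['_'] = sp cs := by
  unfold PySem.Chars.splitOn
  rw [splitOn_go_spec (cs.length + 1) cs [] [] (by omega)]
  cases hsp : sp cs with
  | nil => exact absurd hsp (sp_ne_nil cs)
  | cons h r => simp [headmerge]

theorem count_go_spec (fuel : Nat) : ∀ (l : List Char) (acc : Nat),
    l.length ≤ fuel →
    PySem.Chars.count.go ['_'] fuel l acc = acc + l.count '_' := by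
  induction fuel with
  | zero =>
    intro l acc h
    have : l = [] := List.length_eq_zero_iff.mp (by omega)
    subst this; simp [PySem.Chars.count.go]
  | succ fuel ih =>
    intro l acc h
    cases l with
    | nil => simp [PySem.Chars.count.go]
    | cons c rest =>
      simp only [PySem.Chars.count.go]
      by_cases hc : c = '_'
      · subst hc
        have hp : List.isPrefixOf ['_'] ('_' :: rest) = true := by simp [List.isPrefixOf]
        rw [if_pos hp]
        simp only [List.length_cons] at h
        simp only [List.length_cons, List.length_nil, List.drop_succ_cons, List.drop_zero]
        rw [ih rest (acc + 1) (by omega)]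
        simp
        omega
      · have hp : List.isPrefixOf ['_'] (c :: rest) = false := by
          simp [List.isPrefixOf]; exact fun hh => absurd hh.symm hc
        rw [if_neg (by simp only [hp, Bool.false_eq_true, not_false_iff])]
        simp only [List.length_cons] at h
        rw [ih rest acc (by omega)]
        simp [hc]

theorem chars_count_underscore (cs : List Char) : PySem.Chars.count cs ['_'] = cs.count '_' := by
  unfold PySem.Chars.count
  rw [if_neg (by simp)]
  simpa using count_go_spec cs.length cs 0 (le_refl _)

theorem length_sp (cs : List Char) : (sp cs).length = cs.count '_' + 1 := by
  induction cs with
  | nil => simp [sp]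
  | cons c t ih =>
    simp only [sp]
    cases hsp : sp t with
    | nil => exact absurd hsp (sp_ne_nil t)
    | cons h r =>
      rw [hsp] at ih
      by_cases hc : c = '_'
      · subst hc
        simp only [List.length_cons] at ih
        simp
        omega
      · simp only [List.length_cons] at ih
        simp [hc]
        omega

theorem join_take_sp (cs : List Char) : ∀ (k : Nat), 1 ≤ k →
    PySem.Chars.join ['_'] ((sp cs).take k) = pyPrefixUpto cs k := by
  induction cs with
  | nil =>
    intro k hk
    cases k with
    | zero => omega
    | succ k => simp [sp, pyPrefixUpto, PySem.Chars.join_singleton]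
  | cons c t ih =>
    intro k hk
    simp only [sp]
    cases hsp : sp t with
    | nil => exact absurd hsp (sp_ne_nil t)
    | cons h r =>
      by_cases hc : c = '_'
      · subst hc
        simp only [pyPrefixUpto, if_true]
        by_cases hk1 : k = 1
        · subst hk1
          simp [PySem.Chars.join_singleton]
        · rw [if_neg hk1]
          cases k with
          | zero => omega
          | succ k' =>
            have hk' : 1 ≤ k' := by omega
            have this := ih k' hk'
            rw [hsp] at this
            simp only [List.take_succ_cons]
            cases htk2 : (h :: r).take k' with
            | nil => cases k' with
              | zero => omega
              | succ m => simp at htk2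
            | cons q qs =>
              rw [htk2] at this
              rw [PySem.Chars.join_cons_cons]
              simp only [Nat.add_sub_cancel]
              rw [this]
              simp
      · simp only [pyPrefixUpto, if_neg hc]
        cases k with
        | zero => omega
        | succ k' =>
          simp only [List.take_succ_cons]
          have this := ih (k' + 1) (by omega)
          rw [hsp, List.take_succ_cons] at this
          cases hrest : r.take k' with
          | nil =>
            rw [hrest] at this
            rw [PySem.Chars.join_singleton] at this
            rw [PySem.Chars.join_singleton, this]
          | cons q qs =>
            rw [hrest] at this
            rw [PySem.Chars.join_cons_cons] at this
            rw [PySem.Chars.join_cons_cons, ← this]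
            simp


-- per-ID: A's person_name equals B's scanned prefix, for k = count('_') + 1
theorem person_name_eq (p0 : String) (id : String) :
    PySem.Str.join "_" (PySem.List.slice ((PySem.Str.split? id "_").getD [])
        (some 0) (some (PySem.List.len ((PySem.Str.split? p0 "_").getD [])))) =
    String.ofList (pyPrefixUpto id.toList (PySem.Str.count p0 "_" + 1)) := by
  have hsep : ("_" : String).toList = ['_'] := by decide
  have hsplit : ∀ s : String, (PySem.Str.split? s "_").getD [] = (sp s.toList).map String.ofList := by
    intro s
    simp [PySem.Str.split?, PySem.Chars.split?, hsep, splitOn_eq_sp]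
  have hk : PySem.List.len ((PySem.Str.split? p0 "_").getD [])
      = ((PySem.Str.count p0 "_" + 1 : Nat) : Int) := by
    rw [hsplit]
    simp [PySem.List.len, length_sp, PySem.Str.count, hsep, chars_count_underscore]
  set k : Nat := PySem.Str.count p0 "_" + 1 with hkdef
  have hk1 : 1 ≤ k := by omega
  rw [hk, hsplit]
  have h0 : ¬ ((k : Int) < 0) := by omega
  have hmm : ∀ l : List (List Char), (l.map String.ofList).map String.toList = l := by
    intro l
    rw [List.map_map]
    conv_rhs => rw [← List.map_id l]
    apply List.map_congr_left
    intro a _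
    simp
  have hslice : PySem.List.slice ((sp id.toList).map String.ofList) (some 0) (some (k : Int))
      = ((sp id.toList).take k).map String.ofList := by
    simp [PySem.List.slice, PySem.List.clampIdx, h0, ← List.map_take]
    congr 1
    rcases Nat.le_total k (sp id.toList).length with hkl | hkl
    · rw [Nat.min_eq_left hkl]
    · rw [Nat.min_eq_right hkl, List.take_length, List.take_of_length_le hkl]
  rw [hslice]
  have hjoin : PySem.Str.join "_" (((sp id.toList).take k).map String.ofList)
      = String.ofList (PySem.Chars.join ['_'] ((sp id.toList).take k)) := by
    unfold PySem.Str.join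
    rw [hsep, hmm]
  rw [hjoin, join_take_sp _ k hk1]

theorem contains_eq (person_list : List String) (x : String) :
    person_list.contains x = PySem.Set.contains (PySem.Set.ofList person_list) x := by
  simp only [PySem.Set.contains]
  rw [Bool.eq_iff_iff]
  simp [PySem.Set.mem_ofList]

-- ===== VERDICT (by name: the statement is the Claim_ definition above) =====
theorem get_level_text_spec : Claim_equal_get_level_text := by
  intro person_list text_dict _ hpre
  unfold Spec_get_level_text get_level_text get_level_text_alt
  cases person_list with
  | nil => exact absurd rfl hpre
  | cons p0 rest =>
    have hget : PySem.List.pyGet? (p0 :: rest) (0 : Int) = some p0 := by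
      simp [PySem.List.pyGet?, PySem.List.pyIdx?]
    rw [hget]
    refine congrArg PySem.Dict.items (PySem.List.foldl_congr_mem _ _ _ _ ?_)
    intro acc x _
    beta_reduce
    rw [person_name_eq p0 x.1]
    simp only [contains_eq]
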